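-- pv_equiv track=rewrite | github.com/mooss/ruskea | repextract.py | filterspaces
-- ===== SOURCE A (Python) =====
-- def filterspaces(iterable):
--     prevwasspace = True
--     for char in iterable:
--         if char == ' ':
--             if not prevwasspace:
--                 prevwasspace = True
--                 yield char
--         else:
--             yield char
--             prevwasspace = False
-- ===== SOURCE B (Python) =====
-- def filterspaces(iterable):
--     # run-based scan: handle whole runs of spaces / non-spaces at once
--     s = ''.join(iterable)
--     n = len(s)
--     started = False
--     i = 0
--     while i < n:
--         if s[i] == ' ':
--             j = i
--             while j < n and s[j] == ' ':
--                 j += 1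
--             if started:
--                 yield ' '
--             i = j
--         else:
--             j = i
--             while j < n and s[j] != ' ':
--                 j += 1
--             for ch in s[i:j]:
--                 yield ch
--             started = True
--             i = j
-- ===== Notes on version B (the rewrite author's own statement) =====
-- stated objective: alternative
-- what changed: Replaces the per-character prevwasspace state machine with a run-based scan that consumes whole runs of spaces/non-spaces at once, emitting a single space per interior/trailing space run and tracking only whether any word has started.
import Mathlib
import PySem

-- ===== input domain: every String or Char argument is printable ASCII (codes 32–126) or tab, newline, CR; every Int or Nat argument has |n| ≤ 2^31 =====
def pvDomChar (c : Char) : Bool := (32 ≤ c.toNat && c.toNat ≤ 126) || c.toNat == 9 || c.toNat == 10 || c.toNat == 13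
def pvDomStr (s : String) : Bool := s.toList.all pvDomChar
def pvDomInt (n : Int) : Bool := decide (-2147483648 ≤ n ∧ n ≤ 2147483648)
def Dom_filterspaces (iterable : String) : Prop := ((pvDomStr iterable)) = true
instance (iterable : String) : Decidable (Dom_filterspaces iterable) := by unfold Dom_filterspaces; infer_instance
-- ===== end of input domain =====

-- B replaces A's per-character prevwasspace state machine by a run-based scan over space/non-space runs (alternative decomposition, same cost).


-- ===== PORT A =====
-- Port of A: per-character state machine with prevwasspace flag.
def fsGoA : List Char → Bool → List String
  | [], _ => []
  | c :: rest, prev =>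
    if c == ' ' then
      if !prev then String.mk [c] :: fsGoA rest true
      else fsGoA rest prev
    else String.mk [c] :: fsGoA rest false

def filterspaces (iterable : String) : List String := fsGoA iterable.toList true

-- ===== PORT B =====
-- Port of B: run-based scan (inner while loops = takeWhile/dropWhile over the rest).
def fsGoB : List Char → Bool → List String
  | [], _ => []
  | c :: rest, started =>
    if c == ' ' then
      (if started then [" "] else []) ++ fsGoB (rest.dropWhile (· == ' ')) started
    else
      ((c :: rest).takeWhile (fun ch => !(ch == ' '))).map (fun ch => String.mk [ch])
        ++ fsGoB ((c :: rest).dropWhile (fun ch => !(ch == ' '))) true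
termination_by l _ => l.length
decreasing_by
  · exact Nat.lt_succ_of_le (List.length_dropWhile_le _ _)
  · simp only [List.dropWhile_cons, *]
    exact Nat.lt_succ_of_le (List.length_dropWhile_le _ _)

def filterspaces_alt (iterable : String) : List String := fsGoB iterable.toList false

-- ===== PRECONDITION & SPEC =====
def Spec_filterspaces (iterable : String) (out : List String) : Prop := out = filterspaces_alt iterable
instance (iterable : String) (out : List String) : Decidable (Spec_filterspaces iterable out) := by unfold Spec_filterspaces; infer_instance

-- ===== CLAIM (what is proved, stated in full; the proofs are below) =====
def Claim_equal_filterspaces : Prop := ∀ (iterable : String), Dom_filterspaces iterable → Spec_filterspaces iterable (filterspaces iterable)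

-- ===== LEMMAS AND PROOFS =====

theorem fsGoA_dropSpaces (l : List Char) : fsGoA (l.dropWhile (· == ' ')) true = fsGoA l true := by
  induction l with
  | nil => rfl
  | cons c rest ih =>
    by_cases hc : c == ' '
    · simp [List.dropWhile_cons, hc, ih, fsGoA]
    · simp [List.dropWhile_cons, hc]

theorem fsGoB_dropSpaces_indep (l : List Char) (s t : Bool) :
    fsGoB (l.dropWhile (· == ' ')) s = fsGoB (l.dropWhile (· == ' ')) t := by
  induction l with
  | nil => simp [fsGoB]
  | cons c rest ih =>
    by_cases hc : c == ' '
    · simpa [List.dropWhile_cons, hc] using ih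
    · simp [List.dropWhile_cons, hc, fsGoB]

theorem fsGoB_run (l : List Char) :
    fsGoB l true =
      (l.takeWhile (fun ch => !(ch == ' '))).map (fun ch => String.mk [ch])
        ++ fsGoB (l.dropWhile (fun ch => !(ch == ' '))) true := by
  cases l with
  | nil => rfl
  | cons c rest =>
    by_cases hc : c == ' '
    · simp [List.takeWhile_cons, hc]
    · simp [fsGoB, hc]

theorem fsGo_main (n : Nat) : ∀ l : List Char, l.length ≤ n →
    fsGoA l true = fsGoB l false ∧ fsGoA l false = fsGoB l true := by
  induction n with
  | zero =>
    intro l hl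
    have : l = [] := List.eq_nil_of_length_eq_zero (Nat.le_zero.mp hl)
    subst this; exact ⟨by simp [fsGoA, fsGoB], by simp [fsGoA, fsGoB]⟩
  | succ n ih =>
    intro l hl
    cases l with
    | nil => exact ⟨by simp [fsGoA, fsGoB], by simp [fsGoA, fsGoB]⟩
    | cons c rest =>
      have hr : rest.length ≤ n := Nat.le_of_succ_le_succ hl
      have hd : (rest.dropWhile (· == ' ')).length ≤ n :=
        le_trans (List.length_dropWhile_le _ _) hr
      by_cases hc : c == ' '
      · have hce : c = ' ' := by exact eq_of_beq hc
        constructor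
        · have h1 : fsGoA (c :: rest) true = fsGoA (rest.dropWhile (· == ' ')) true := by
            simp [fsGoA, hc, fsGoA_dropSpaces]
          rw [h1, (ih _ hd).1]
          simp [fsGoB, hc]
        · have h1 : fsGoA (c :: rest) false = String.mk [c] :: fsGoA (rest.dropWhile (· == ' ')) true := by
            simp [fsGoA, hc, fsGoA_dropSpaces]
          rw [h1, (ih _ hd).1, fsGoB_dropSpaces_indep rest false true]
          subst hce
          simp [fsGoB]
          rfl
      · have key : ∀ p q : Bool, fsGoA (c :: rest) p = fsGoB (c :: rest) q := by
          intro p q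
          have h1 : fsGoA (c :: rest) p = String.mk [c] :: fsGoA rest false := by
            simp [fsGoA, hc]
          rw [h1, (ih _ hr).2, fsGoB_run rest]
          simp [fsGoB, hc]
        exact ⟨key true false, key false true⟩

-- ===== VERDICT (by name: the statement is the Claim_ definition above) =====
theorem filterspaces_spec : Claim_equal_filterspaces := by
  intro s _
  unfold Spec_filterspaces filterspaces filterspaces_alt
  exact (fsGo_main s.toList.length s.toList le_rfl).1
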